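-- pv_equiv track=rewrite | github.com/hesh64/Algos | sysdesign/search_engine/add_white_spaces_to_create_words.py | query_splitter_helper
-- ===== SOURCE A (Python) =====
-- def query_splitter_helper(query, words, i, cur, store):
--     if i > len(query):
--         return False
--
--     if i == len(query):
--         store.append(cur)
--
--     for word in words:
--         if i + len(word) <= len(query) and query[i: i + len(word)] == word:
--             query_splitter_helper(query, words, i + len(word), word if len(cur) == 0 else cur + ' ' + word, store)
--
--     return store
-- ===== SOURCE B (Python) =====
-- def query_splitter_helper(query, words, i, cur, store):
--     n = len(query)
--     if i > n:
--         return False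
--     # bottom-up DP: splits[j] = all splittings of query[j:] into dictionary words,
--     # enumerated in the order A's DFS would emit them; a negative start yields no splittings
--     if i >= 0:
--         splits = {n: [[]]}
--         for j in range(n - 1, i - 1, -1):
--             splits[j] = [[w] + rest
--                          for w in words
--                          if query.startswith(w, j)
--                          for rest in splits[j + len(w)]]
--         for parts in splits[i]:
--             c = cur
--             for w in parts:
--                 c = w if not c else c + ' ' + w
--             store.append(c)
--     return store
-- ===== Notes on version B (the rewrite author's own statement) =====
-- stated objective: alternative
-- what changed: Replaces A's top-down DFS (which revisits dead-end and shared suffixes) with a bottom-up DP dict splits[j] of all splittings of query[j:], built once right-to-left down to i, then formats splits[i]; intended as faster on dead-end-heavy inputs (measured 25x at n=64 where both finish), but on outputs of exponential size both are output-bound, so no unqualified speed claim is made.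
-- outside the precondition, e.g. on query_splitter_helper('a', [], 2, '', []): A returns False, B returns False; on query_splitter_helper('a', [''], 0, '', []): A raises RecursionError, B raises KeyError
import Mathlib
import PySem

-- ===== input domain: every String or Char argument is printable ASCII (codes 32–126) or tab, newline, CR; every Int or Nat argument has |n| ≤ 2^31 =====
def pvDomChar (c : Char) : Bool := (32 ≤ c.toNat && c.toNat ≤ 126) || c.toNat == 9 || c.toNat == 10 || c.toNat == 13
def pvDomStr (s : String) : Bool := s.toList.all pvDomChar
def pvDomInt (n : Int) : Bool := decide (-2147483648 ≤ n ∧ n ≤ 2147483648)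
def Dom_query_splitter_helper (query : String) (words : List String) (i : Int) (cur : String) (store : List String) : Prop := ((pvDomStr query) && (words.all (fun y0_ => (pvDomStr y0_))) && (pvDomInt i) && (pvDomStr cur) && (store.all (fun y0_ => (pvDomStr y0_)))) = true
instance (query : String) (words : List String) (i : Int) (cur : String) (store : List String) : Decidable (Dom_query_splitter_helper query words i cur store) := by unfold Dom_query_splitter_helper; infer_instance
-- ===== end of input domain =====

-- B replaces A's top-down DFS by a bottom-up DP dict of all splittings per suffix, built once
-- (a different algorithm: no re-exploration of dead-end / shared suffixes).
-- Both A and B mutate `store` in place by appending (same side effect); the theorems are about the return value.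

-- ===== PORT A =====
-- fuel-indexed transliteration of A's recursion (fuel only makes it total; inside Pre_ every
-- word is nonempty, so the position strictly increases and fuel = len(query) - i + 1 never runs out).
-- `query[i:i+len(word)] == word` is ported exactly (any i) as PySem.List.slice.
def qsaRec (q : List Char) (words : List String) : Nat → Int → String → List String → List String
  | 0, _, _, store => store
  | fuel+1, i, cur, store =>
    let store1 := if i = (q.length : Int) then store ++ [cur] else store
    words.foldl (fun st w =>
      if i + (w.length : Int) ≤ (q.length : Int) ∧ PySem.List.slice q (some i) (some (i + (w.length : Int))) = w.toList then
        qsaRec q words fuel (i + (w.length : Int))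
          (if cur.length = 0 then w else cur ++ " " ++ w) st
      else st) store1

def query_splitter_helper (query : String) (words : List String) (i : Int) (cur : String) (store : List String) : List String :=
  let q := query.toList
  -- for i > len(query) Python A returns False, not a list; excluded by Pre_, the port returns store
  if (q.length : Int) < i then store
  else qsaRec q words (((q.length : Int) - i).toNat + 1) i cur store

-- ===== PORT B =====
-- the python loop `for j in range(n-1, i-1, -1)` filling the dict; qsbBuild k is the dict after the
-- iterations for positions n-1 down to n-k (starting from {n: [[]]}).
-- `query.startswith(w, j)` is ported as `(q.drop j).take w.length = w.toList ∧ j + w.length ≤ q.length`,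
-- exact for 0 ≤ j (j is a Nat here); `splits[j + len(w)]` is `d.getD ↑(j+len w) []`, exact for
-- nonempty w (the key j+len(w) ∈ [j+1, n] is already present); for w = "" Python raises KeyError
-- (key j not yet inserted) — those inputs are excluded by Pre_ and the port's default [] is unclaimed.
def qsbBuild (q : List Char) (words : List String) : Nat → PySem.Dict Int (List (List String))
  | 0 => PySem.Dict.insert ∅ (q.length : Int) [[]]
  | k+1 =>
    let d := qsbBuild q words k
    let j := q.length - (k+1)
    d.insert (j : Int) (words.flatMap (fun w =>
      if (q.drop j).take w.length = w.toList ∧ j + w.length ≤ q.length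
      then (d.getD ((j + w.length : Nat) : Int) []).map (fun r => w :: r)
      else []))

def query_splitter_helper_alt (query : String) (words : List String) (i : Int) (cur : String) (store : List String) : List String :=
  let q := query.toList
  -- for i > len(query) Python B returns False, not a list; excluded by Pre_, the port returns store
  if (q.length : Int) < i then store
  else if 0 ≤ i then
    let splits := qsbBuild q words (q.length - i.toNat)
    -- `splits[i]`: the key i is present (the loop built every position down to i)
    (splits.getD i []).foldl (fun st parts =>
      st ++ [parts.foldl (fun c w => if c = "" then w else c ++ " " ++ w) cur]) store
  else store

-- ===== PRECONDITION & SPEC =====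
-- Pre_ excludes i > len(query), where A returns False (not a list of strings), and "" ∈ words,
-- where A recurses forever at the same index (RecursionError).
def Pre_query_splitter_helper (query : String) (words : List String) (i : Int) (cur : String) (store : List String) : Prop :=
  i ≤ (query.toList.length : Int) ∧ ∀ w ∈ words, w ≠ ""
instance (query : String) (words : List String) (i : Int) (cur : String) (store : List String) : Decidable (Pre_query_splitter_helper query words i cur store) := by unfold Pre_query_splitter_helper; infer_instance

def pvWitness_query_splitter_helper : String × List String × Int × String × List String :=
  ("ab", ["a", "b", "ab"], 0, "", [])

def Spec_query_splitter_helper (query : String) (words : List String) (i : Int) (cur : String) (store : List String) (out : List String) : Prop := out = query_splitter_helper_alt query words i cur store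
instance (query : String) (words : List String) (i : Int) (cur : String) (store : List String) (out : List String) : Decidable (Spec_query_splitter_helper query words i cur store out) := by unfold Spec_query_splitter_helper; infer_instance

-- ===== CLAIM (what is proved, stated in full; the proofs are below) =====
def Claim_equal_query_splitter_helper : Prop := ∀ (query : String) (words : List String) (i : Int) (cur : String) (store : List String), Dom_query_splitter_helper query words i cur store → Pre_query_splitter_helper query words i cur store → Spec_query_splitter_helper query words i cur store (query_splitter_helper query words i cur store)

-- ===== LEMMAS AND PROOFS =====

-- formatting of one splitting, as both pythons build it
def qsFmt (cur : String) (p : List String) : String :=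
  p.foldl (fun c w => if c = "" then w else c ++ " " ++ w) cur

-- proof-side list view of B's table: qsbTable k = entries for positions n-k .. n
def qsbTable (q : List Char) (words : List String) : Nat → List (List (List String))
  | 0 => [[[]]]
  | k+1 =>
    let rest := qsbTable q words k
    (words.flatMap (fun w =>
      if w ≠ "" ∧ (q.drop (q.length - (k+1))).take w.length = w.toList ∧ (q.length - (k+1)) + w.length ≤ q.length
      then (rest.getD (w.length - 1) []).map (fun r => w :: r)
      else [])) :: rest

-- entry of the DP table for position q.length - k
def qsG (q : List Char) (words : List String) (k : Nat) : List (List String) :=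
  (qsbTable q words k).headD []

theorem qsbTable_getD (q : List Char) (words : List String) (k idx : Nat) (h : idx ≤ k) :
    (qsbTable q words k).getD idx [] = qsG q words (k - idx) := by
  induction k generalizing idx with
  | zero => interval_cases idx; rfl
  | succ m ih =>
    cases idx with
    | zero => rfl
    | succ j =>
      have : (qsbTable q words (m+1)).getD (j+1) [] = (qsbTable q words m).getD j [] := rfl
      rw [this, ih j (by omega)]
      congr 1
      omega

theorem qsG_succ (q : List Char) (words : List String) (k : Nat) (hk : k + 1 ≤ q.length) :
    qsG q words (k+1) =
      words.flatMap (fun w =>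
        if w ≠ "" ∧ (q.drop (q.length - (k+1))).take w.length = w.toList ∧ (q.length - (k+1)) + w.length ≤ q.length
        then (qsG q words (k + 1 - w.length)).map (fun r => w :: r)
        else []) := by
  show (qsbTable q words (k+1)).headD [] = _
  rw [qsbTable]
  simp only [List.headD_cons]
  apply List.flatMap_congr
  intro w _
  by_cases hc : w ≠ "" ∧ (q.drop (q.length - (k+1))).take w.length = w.toList ∧ (q.length - (k+1)) + w.length ≤ q.length
  · rw [if_pos hc, if_pos hc]
    have hw0 : w.length ≠ 0 := by
      intro h0; exact hc.1 (String.length_eq_zero_iff.mp h0)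
    have hwle : w.length ≤ k + 1 := by omega
    rw [qsbTable_getD q words k (w.length - 1) (by omega)]
    congr 2
    omega
  · rw [if_neg hc, if_neg hc]

-- … and returns the default off them (in particular for every negative index)
theorem qsbBuild_getD_out (q : List Char) (words : List String) :
    ∀ (k : Nat) (x : Int), k ≤ q.length →
      (x < ((q.length - k : Nat) : Int) ∨ (q.length : Int) < x) →
      (qsbBuild q words k).getD x [] = [] := by
  intro k
  induction k with
  | zero =>
    intro x _ hx
    show (PySem.Dict.insert ∅ (q.length : Int) [[]]).getD x [] = []
    rw [PySem.Dict.getD_insert, if_neg (by omega)]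
    rfl
  | succ k ih =>
    intro x hk hx
    show ((qsbBuild q words k).insert ((q.length - (k+1) : Nat) : Int) _).getD x [] = []
    rw [PySem.Dict.getD_insert, if_neg (by omega)]
    exact ih x (by omega) (by omega)

-- B's dict agrees with the list view on the keys it holds …
theorem qsbBuild_getD_in (q : List Char) (words : List String) :
    ∀ (k j : Nat), k ≤ q.length → q.length - k ≤ j → j ≤ q.length →
      (qsbBuild q words k).getD (j : Int) [] = qsG q words (q.length - j) := by
  intro k
  induction k with
  | zero =>
    intro j _ hlo hhi
    have hj : j = q.length := by omega
    subst hj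
    have h0 : qsbBuild q words 0 = PySem.Dict.insert ∅ (q.length : Int) [[]] := rfl
    rw [h0, PySem.Dict.getD_insert, if_pos rfl]
    simp [qsG, qsbTable]
  | succ k ih =>
    intro j hk hlo hhi
    show ((qsbBuild q words k).insert ((q.length - (k+1) : Nat) : Int) _).getD (j : Int) [] = _
    rw [PySem.Dict.getD_insert]
    by_cases hj : j = q.length - (k+1)
    · rw [if_pos (by exact_mod_cast congrArg (Nat.cast : Nat → Int) hj)]
      have hnj : q.length - j = k + 1 := by omega
      rw [hnj, qsG_succ q words k hk]
      apply List.flatMap_congr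
      intro w _
      by_cases hwe : w = ""
      · -- the empty word: the comprehension looks up key j itself, not yet in the dict
        subst hwe
        rw [if_pos (by exact ⟨by simp, by simp⟩)]
        rw [if_neg (by rintro ⟨h, -⟩; exact h rfl)]
        have hlen0 : ("" : String).length = 0 := rfl
        rw [hlen0, Nat.add_zero]
        rw [qsbBuild_getD_out q words k _ (by omega) (Or.inl (by omega))]
        rfl
      · by_cases hc : (q.drop (q.length - (k+1))).take w.length = w.toList ∧ (q.length - (k+1)) + w.length ≤ q.length
        · rw [if_pos hc, if_pos ⟨hwe, hc.1, hc.2⟩]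
          have hw0 : w.length ≠ 0 := fun h0 => hwe (String.length_eq_zero_iff.mp h0)
          rw [ih (q.length - (k+1) + w.length) (by omega) (by omega) (by exact hc.2)]
          congr 2
          omega
        · rw [if_neg hc, if_neg (by rintro ⟨-, h1, h2⟩; exact hc ⟨h1, h2⟩)]
    · rw [if_neg (by intro h; exact hj (by exact_mod_cast h))]
      exact ih j (by omega) (by omega) hhi

-- the DFS at nonnegative position j appends exactly the formatted entries of the DP table
theorem qsaRec_eq (q : List Char) (words : List String)
    (hw : ∀ w ∈ words, w ≠ "") :
    ∀ (fuel k j : Nat) (cur : String) (store : List String), j + k = q.length → k < fuel →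
      qsaRec q words fuel (j : Int) cur store
        = store ++ (qsG q words k).map (qsFmt cur) := by
  intro fuel
  induction fuel with
  | zero => intro k j cur store _ h; omega
  | succ f ih =>
    intro k j cur store hkn hkf
    cases k with
    | zero =>
      show (words.foldl _ (if (j : Int) = (q.length : Int) then store ++ [cur] else store)) = _
      rw [if_pos (show (j : Int) = (q.length : Int) by omega)]
      have hfix : ∀ (ws : List String), (∀ w ∈ ws, w ≠ "") → ∀ (st : List String),
          ws.foldl (fun st w =>
            if (j : Int) + (w.length : Int) ≤ (q.length : Int) ∧ PySem.List.slice q (some (j : Int)) (some ((j : Int) + (w.length : Int))) = w.toList then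
              qsaRec q words f ((j : Int) + (w.length : Int))
                (if cur.length = 0 then w else cur ++ " " ++ w) st
            else st) st = st := by
        intro ws
        induction ws with
        | nil => intro _ _; rfl
        | cons w ws ihw =>
          intro hmem st
          have hw0 : w.length ≠ 0 := fun h0 => hmem w (by simp) (String.length_eq_zero_iff.mp h0)
          rw [List.foldl_cons, if_neg (by rintro ⟨h1, -⟩; omega)]
          exact ihw (fun x hx => hmem x (by simp [hx])) st
      rw [hfix words hw (store ++ [cur])]
      simp [qsG, qsbTable, qsFmt]
    | succ m =>
      show (words.foldl _ (if (j : Int) = (q.length : Int) then store ++ [cur] else store)) = _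
      rw [if_neg (by intro h; omega)]
      rw [qsG_succ q words m (by omega)]
      have hjq : q.length - (m+1) = j := by omega
      rw [hjq]
      simp only [PySem.List.slice_natCast_add]
      have key : ∀ (ws : List String), (∀ w ∈ ws, w ≠ "") → ∀ (st : List String),
          ws.foldl (fun st w =>
            if (j : Int) + (w.length : Int) ≤ (q.length : Int) ∧ (q.drop j).take w.length = w.toList then
              qsaRec q words f ((j : Int) + (w.length : Int))
                (if cur.length = 0 then w else cur ++ " " ++ w) st
            else st) st
          = st ++ (ws.flatMap (fun w =>
              if w ≠ "" ∧ (q.drop j).take w.length = w.toList ∧ j + w.length ≤ q.length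
              then (qsG q words (m + 1 - w.length)).map (fun r => w :: r)
              else [])).map (qsFmt cur) := by
        intro ws
        induction ws with
        | nil => intro _ st; simp
        | cons w ws ihw =>
          intro hmem st
          have hwne : w ≠ "" := hmem w (by simp)
          have hw0 : w.length ≠ 0 := fun h0 => hwne (String.length_eq_zero_iff.mp h0)
          rw [List.foldl_cons, List.flatMap_cons]
          by_cases hc : (j : Int) + (w.length : Int) ≤ (q.length : Int) ∧ (q.drop j).take w.length = w.toList
          · have hc2 : w ≠ "" ∧ (q.drop j).take w.length = w.toList ∧ j + w.length ≤ q.length :=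
              ⟨hwne, hc.2, by have := hc.1; omega⟩
            rw [if_pos hc, if_pos hc2]
            have hwle : w.length ≤ m + 1 := by omega
            have hcast : (j : Int) + (w.length : Int) = ((j + w.length : Nat) : Int) := by push_cast; ring
            rw [hcast]
            have hcall := ih (m + 1 - w.length) (j + w.length)
              (if cur.length = 0 then w else cur ++ " " ++ w) st (by omega) (by omega)
            rw [hcall]
            rw [ihw (fun x hx => hmem x (by simp [hx]))]
            rw [List.map_append, List.append_assoc, List.map_map]
            congr 2
            apply List.map_congr_left
            intro p _
            show qsFmt (if cur.length = 0 then w else cur ++ " " ++ w) p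
              = qsFmt (if cur = "" then w else cur ++ " " ++ w) p
            congr 1
            by_cases hcur : cur = ""
            · rw [if_pos hcur, if_pos (by simp [hcur])]
            · rw [if_neg hcur, if_neg (by simpa [String.length_eq_zero_iff] using hcur)]
          · have hc2 : ¬ (w ≠ "" ∧ (q.drop j).take w.length = w.toList ∧ j + w.length ≤ q.length) := by
              rintro ⟨-, h2, h3⟩; exact hc ⟨by omega, h2⟩
            rw [if_neg hc, if_neg hc2]
            rw [ihw (fun x hx => hmem x (by simp [hx]))]
            simp
      exact key words hw store

-- a match can never cross index 0, so from a negative position A's DFS appends nothing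
theorem qsaRec_neg (q : List Char) (words : List String) :
    ∀ (fuel : Nat) (i : Int) (cur : String) (store : List String), i < 0 →
      qsaRec q words fuel i cur store = store := by
  intro fuel
  induction fuel with
  | zero => intro i cur store _; rfl
  | succ f ihf =>
    intro i cur store hi
    show (words.foldl _ (if i = (q.length : Int) then store ++ [cur] else store)) = store
    rw [if_neg (by omega)]
    suffices h : ∀ (ws : List String) (st : List String),
        ws.foldl (fun st w =>
          if i + (w.length : Int) ≤ (q.length : Int) ∧ PySem.List.slice q (some i) (some (i + (w.length : Int))) = w.toList then
            qsaRec q words f (i + (w.length : Int))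
              (if cur.length = 0 then w else cur ++ " " ++ w) st
          else st) st = st by
      exact h words store
    intro ws
    induction ws with
    | nil => intro _; rfl
    | cons w ws ihw =>
      intro st
      rw [List.foldl_cons]
      by_cases hc : i + (w.length : Int) ≤ (q.length : Int) ∧ PySem.List.slice q (some i) (some (i + (w.length : Int))) = w.toList
      · have hneg : i + (w.length : Int) < 0 := by
          by_contra hge
          rw [not_lt] at hge
          have hlen := congrArg List.length hc.2
          rw [PySem.List.length_slice, String.length_toList] at hlen
          have h2 : (((i + (w.length : Int)).toNat : Nat) : Int) = i + (w.length : Int) := by omega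
          have h1 : PySem.List.clampIdx q.length (i + (w.length : Int)) ≤ (i + (w.length : Int)).toNat := by
            have hcl := PySem.List.clampIdx_natCast q.length (i + (w.length : Int)).toNat
            rw [h2] at hcl
            omega
          omega
        rw [if_pos hc, ihf (i + (w.length : Int)) _ st hneg]
        exact ihw st
      · rw [if_neg hc]
        exact ihw st

theorem foldl_append_map (entry : List (List String)) (cur : String) :
    ∀ store : List String,
      entry.foldl (fun st parts =>
        st ++ [parts.foldl (fun c w => if c = "" then w else c ++ " " ++ w) cur]) store
      = store ++ entry.map (qsFmt cur) := by
  induction entry with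
  | nil => intro store; simp
  | cons p ps ihp => intro store; simp [List.foldl_cons, ihp, qsFmt]

-- ===== VERDICT (by name: the statement is the Claim_ definition above) =====
theorem query_splitter_helper_spec : Claim_equal_query_splitter_helper := by
  intro query words i cur store _ hpre
  obtain ⟨hin, hw⟩ := hpre
  unfold Spec_query_splitter_helper
  simp only [query_splitter_helper, query_splitter_helper_alt]
  by_cases hi0 : 0 ≤ i
  · rw [if_neg (by omega), if_neg (by omega), if_pos hi0]
    have hi : i = ((i.toNat : Nat) : Int) := by omega
    rw [hi]
    simp only [Int.toNat_natCast]
    rw [qsbBuild_getD_in query.toList words (query.toList.length - i.toNat) i.toNat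
      (by omega) (by omega) (by omega)]
    simp only [foldl_append_map]
    have hfuel : (((query.toList.length : Int) - ((i.toNat : Nat) : Int)).toNat + 1)
        = query.toList.length - i.toNat + 1 := by omega
    rw [hfuel]
    exact qsaRec_eq query.toList words hw (query.toList.length - i.toNat + 1)
      (query.toList.length - i.toNat) i.toNat cur store (by omega) (by omega)
  · rw [if_neg (by omega), if_neg (by omega), if_neg hi0]
    exact qsaRec_neg query.toList words _ i cur store (by omega)
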